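-- pv_equiv track=rewrite | github.com/boujeepants24/automation-leads | ai_automation_dentists/ai_outreach.py | format_issues_list
-- ===== SOURCE A (Python) =====
-- def format_issues_list(issues):
--     """Turn automation gaps into natural, conversational prose."""
--     if not issues:
--         return "a few areas where things could run more smoothly"
--
--     cleaned = []
--     for issue in issues:
--         i_lower = issue.lower()
--         if "booking" in i_lower or "appointment" in i_lower:
--             cleaned.append("how patients book appointments")
--         elif "chatbot" in i_lower or "chat" in i_lower:
--             cleaned.append("after-hours patient communication")
--         elif "review" in i_lower:
--             cleaned.append("how you're collecting patient reviews")
--         elif "portal" in i_lower: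
--             cleaned.append("patient access to their records")
--         elif "sms" in i_lower or "text" in i_lower:
--             cleaned.append("text-based communication with patients")
--         elif "phone-only" in i_lower or "call" in i_lower:
--             cleaned.append("the booking flow relying entirely on phone calls")
--         elif "paper" in i_lower or "print" in i_lower:
--             cleaned.append("intake forms that still need to be printed")
--         elif "email marketing" in i_lower:
--             cleaned.append("staying in touch with patients between visits")
--         else:
--             cleaned.append("some workflow gaps")
--
--     cleaned = list(dict.fromkeys(cleaned))
--
--     if len(cleaned) == 1:
--         return cleaned[0]
--     elif len(cleaned) == 2:
--         return f"{cleaned[0]} and {cleaned[1]}"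
--     else:
--         return f"{cleaned[0]}, {cleaned[1]}, and a couple of other things"
-- ===== SOURCE B (Python) =====
-- _RULES = [
--     (("booking", "appointment"), "how patients book appointments"),
--     (("chatbot", "chat"), "after-hours patient communication"),
--     (("review",), "how you're collecting patient reviews"),
--     (("portal",), "patient access to their records"),
--     (("sms", "text"), "text-based communication with patients"),
--     (("phone-only", "call"), "the booking flow relying entirely on phone calls"),
--     (("paper", "print"), "intake forms that still need to be printed"),
--     (("email marketing",), "staying in touch with patients between visits"),
-- ]
--
--
-- def _classify(issue):
--     low = issue.lower()
--     for keys, phrase in _RULES: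
--         if any(k in low for k in keys):
--             return phrase
--     return "some workflow gaps"
--
--
-- def format_issues_list(issues):
--     """Turn automation gaps into natural, conversational prose."""
--     if not issues:
--         return "a few areas where things could run more smoothly"
--     first = None
--     second = None
--     more = False
--     for issue in issues:
--         p = _classify(issue)
--         if first is None:
--             first = p
--         elif p != first:
--             if second is None:
--                 second = p
--             elif p != second:
--                 more = True
--                 break
--     if second is None:
--         return first
--     if not more:
--         return f"{first} and {second}"
--     return f"{first}, {second}, and a couple of other things"
-- ===== Notes on version B (the rewrite author's own statement) =====
-- stated objective: alternative
-- what changed: Replaces the inline if/elif chain with an ordered rule table scanned first-match, and replaces build-list + dict.fromkeys dedup + length dispatch with a single streaming pass that keeps only the first two distinct phrases and a 'more' flag, breaking early once a third distinct phrase appears.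
import Mathlib
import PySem

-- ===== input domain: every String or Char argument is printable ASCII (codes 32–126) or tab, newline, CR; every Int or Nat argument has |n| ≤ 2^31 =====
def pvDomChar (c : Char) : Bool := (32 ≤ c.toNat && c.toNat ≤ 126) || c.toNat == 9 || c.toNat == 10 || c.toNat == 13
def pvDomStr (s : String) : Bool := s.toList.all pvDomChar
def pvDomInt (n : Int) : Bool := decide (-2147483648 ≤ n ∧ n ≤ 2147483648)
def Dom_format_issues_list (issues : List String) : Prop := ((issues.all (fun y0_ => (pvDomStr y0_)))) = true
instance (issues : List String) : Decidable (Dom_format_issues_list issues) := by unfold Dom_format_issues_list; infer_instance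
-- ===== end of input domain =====

-- B replaces A's if/elif chain by an ordered rule table and A's build-dedup-format pipeline
-- by one streaming pass keeping only the first two distinct phrases (objective: alternative).

-- ===== PORT A =====
def format_issues_list (issues : List String) : String :=
  if issues = [] then "a few areas where things could run more smoothly"
  else
    let cleaned := issues.foldl (fun cleaned issue =>
      cleaned ++ [(
        let il := PySem.Str.lower issue
        if PySem.Str.isIn "booking" il || PySem.Str.isIn "appointment" il then "how patients book appointments"
        else if PySem.Str.isIn "chatbot" il || PySem.Str.isIn "chat" il then "after-hours patient communication"
        else if PySem.Str.isIn "review" il then "how you're collecting patient reviews"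
        else if PySem.Str.isIn "portal" il then "patient access to their records"
        else if PySem.Str.isIn "sms" il || PySem.Str.isIn "text" il then "text-based communication with patients"
        else if PySem.Str.isIn "phone-only" il || PySem.Str.isIn "call" il then "the booking flow relying entirely on phone calls"
        else if PySem.Str.isIn "paper" il || PySem.Str.isIn "print" il then "intake forms that still need to be printed"
        else if PySem.Str.isIn "email marketing" il then "staying in touch with patients between visits"
        else "some workflow gaps")]) []
    let cleaned := PySem.List.dedup cleaned
    if cleaned.length = 1 then PySem.List.pyGetD cleaned 0 ""
    else if cleaned.length = 2 then
      PySem.List.pyGetD cleaned 0 "" ++ " and " ++ PySem.List.pyGetD cleaned 1 ""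
    else
      PySem.List.pyGetD cleaned 0 "" ++ ", " ++ PySem.List.pyGetD cleaned 1 "" ++ ", and a couple of other things"

-- ===== PORT B =====
def fblRules : List (List String × String) :=
  [ (["booking", "appointment"], "how patients book appointments"),
    (["chatbot", "chat"], "after-hours patient communication"),
    (["review"], "how you're collecting patient reviews"),
    (["portal"], "patient access to their records"),
    (["sms", "text"], "text-based communication with patients"),
    (["phone-only", "call"], "the booking flow relying entirely on phone calls"),
    (["paper", "print"], "intake forms that still need to be printed"),
    (["email marketing"], "staying in touch with patients between visits") ]

def fblMatch : List (List String × String) → String → String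
  | [], _ => "some workflow gaps"
  | (keys, phrase) :: rest, low =>
      if keys.any (fun k => PySem.Str.isIn k low) then phrase else fblMatch rest low

def fblClassify (issue : String) : String :=
  fblMatch fblRules (PySem.Str.lower issue)

-- the streaming loop: first two distinct phrases plus a 'more' flag, early break on a third
def fblScan : List String → Option String → Option String → Option String × Option String × Bool
  | [], first, second => (first, second, false)
  | issue :: rest, first, second =>
      let p := fblClassify issue
      match first, second with
      | none, _ => fblScan rest (some p) none
      | some f, none => if p = f then fblScan rest (some f) none else fblScan rest (some f) (some p)
      | some f, some s =>
          if p = f || p = s then fblScan rest (some f) (some s) else (some f, some s, true)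

def format_issues_list_alt (issues : List String) : String :=
  if issues = [] then "a few areas where things could run more smoothly"
  else
    match fblScan issues none none with
    | (some f, none, _) => f
    | (some f, some s, false) => f ++ " and " ++ s
    | (some f, some s, true) => f ++ ", " ++ s ++ ", and a couple of other things"
    | (none, _, _) => ""

-- ===== PRECONDITION & SPEC =====
def Spec_format_issues_list (issues : List String) (out : String) : Prop := out = format_issues_list_alt issues
instance (issues : List String) (out : String) : Decidable (Spec_format_issues_list issues out) := by unfold Spec_format_issues_list; infer_instance

-- ===== CLAIM (what is proved, stated in full; the proofs are below) =====
def Claim_equal_format_issues_list : Prop := ∀ (issues : List String), Dom_format_issues_list issues → Spec_format_issues_list issues (format_issues_list issues)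

-- ===== LEMMAS AND PROOFS =====

theorem fblClassify_eq (issue : String) :
    fblClassify issue =
      (let il := PySem.Str.lower issue
        if PySem.Str.isIn "booking" il || PySem.Str.isIn "appointment" il then "how patients book appointments"
        else if PySem.Str.isIn "chatbot" il || PySem.Str.isIn "chat" il then "after-hours patient communication"
        else if PySem.Str.isIn "review" il then "how you're collecting patient reviews"
        else if PySem.Str.isIn "portal" il then "patient access to their records"
        else if PySem.Str.isIn "sms" il || PySem.Str.isIn "text" il then "text-based communication with patients"
        else if PySem.Str.isIn "phone-only" il || PySem.Str.isIn "call" il then "the booking flow relying entirely on phone calls"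
        else if PySem.Str.isIn "paper" il || PySem.Str.isIn "print" il then "intake forms that still need to be printed"
        else if PySem.Str.isIn "email marketing" il then "staying in touch with patients between visits"
        else "some workflow gaps") := by
  simp [fblClassify, fblRules, fblMatch]

theorem fblScan_inv (issues : List String) (d0 : List String) (h2 : d0.length ≤ 2) :
    fblScan issues d0[0]? d0[1]? =
      (let u := PySem.Set.update d0 (issues.map fblClassify)
       (u[0]?, u[1]?, decide (3 ≤ u.length))) := by
  induction issues generalizing d0 with
  | nil =>
    simp only [fblScan, List.map_nil, PySem.Set.update, List.foldl_nil]
    have : ¬ (3 ≤ d0.length) := by omega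
    simp [this]
  | cons issue rest ih =>
    have hstep : ∀ (s : List String) (x : String) (xs : List String),
        PySem.Set.update s (x :: xs) = PySem.Set.update (PySem.Set.add s x) xs := by
      intro s x xs; simp [PySem.Set.update]
    match d0, h2 with
    | [], _ =>
      simp only [fblScan, List.getElem?_nil, List.map_cons, hstep]
      have hadd : PySem.Set.add ([] : List String) (fblClassify issue) = [fblClassify issue] := by
        simp [PySem.Set.add]
      rw [hadd]
      exact ih [fblClassify issue] (by simp)
    | [f], _ =>
      simp only [fblScan, List.getElem?_cons_zero, List.getElem?_cons_succ, List.getElem?_nil,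
        List.map_cons, hstep]
      by_cases hpf : fblClassify issue = f
      · have hadd : PySem.Set.add [f] (fblClassify issue) = [f] := by
          simp [PySem.Set.add, hpf]
        rw [if_pos hpf, hadd]
        exact ih [f] (by simp)
      · have hadd : PySem.Set.add [f] (fblClassify issue) = [f, fblClassify issue] := by
          simp [PySem.Set.add, PySem.Set.contains]
          exact fun h => hpf h
        rw [if_neg hpf, hadd]
        exact ih [f, fblClassify issue] (by simp)
    | [f, s], _ =>
      simp only [fblScan, List.getElem?_cons_zero, List.getElem?_cons_succ, List.getElem?_nil,
        List.map_cons, hstep]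
      by_cases hmem : fblClassify issue = f ∨ fblClassify issue = s
      · have hc : (fblClassify issue = f || fblClassify issue = s) = true := by
          rcases hmem with h | h <;> simp [h]
        have hadd : PySem.Set.add [f, s] (fblClassify issue) = [f, s] := by
          rcases hmem with h | h <;> simp [PySem.Set.add, h]
        simp only [hc, if_true, hadd]
        exact ih [f, s] (by simp)
      · push Not at hmem
        have hc : (fblClassify issue = f || fblClassify issue = s) = false := by
          simp [hmem.1, hmem.2]
        have hadd : PySem.Set.add [f, s] (fblClassify issue) = [f, s, fblClassify issue] := by
          simp [PySem.Set.add, PySem.Set.contains]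
          exact hmem
        simp only [hc, hadd]
        rw [PySem.Set.update_eq_append_filter]
        simp

-- ===== VERDICT (by name: the statement is the Claim_ definition above) =====
theorem fbl_map_eq (issues : List String) :
    issues.foldl (fun cleaned issue =>
      cleaned ++ [(
        let il := PySem.Str.lower issue
        if PySem.Str.isIn "booking" il || PySem.Str.isIn "appointment" il then "how patients book appointments"
        else if PySem.Str.isIn "chatbot" il || PySem.Str.isIn "chat" il then "after-hours patient communication"
        else if PySem.Str.isIn "review" il then "how you're collecting patient reviews"
        else if PySem.Str.isIn "portal" il then "patient access to their records"
        else if PySem.Str.isIn "sms" il || PySem.Str.isIn "text" il then "text-based communication with patients"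
        else if PySem.Str.isIn "phone-only" il || PySem.Str.isIn "call" il then "the booking flow relying entirely on phone calls"
        else if PySem.Str.isIn "paper" il || PySem.Str.isIn "print" il then "intake forms that still need to be printed"
        else if PySem.Str.isIn "email marketing" il then "staying in touch with patients between visits"
        else "some workflow gaps")]) [] = issues.map fblClassify := by
  rw [PySem.List.foldl_append_singleton_eq_map]
  simp only [List.nil_append]
  exact List.map_congr_left fun i _ => (fblClassify_eq i).symm

theorem fbl_scan_dedup (issues : List String) :
    fblScan issues none none =
      (let d := PySem.List.dedup (issues.map fblClassify)
       (d[0]?, d[1]?, decide (3 ≤ d.length))) := by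
  have h := fblScan_inv issues [] (by simp)
  simpa [PySem.Set.update, PySem.List.dedup_eq_ofList, PySem.Set.ofList_eq_foldl] using h

theorem format_issues_list_spec : Claim_equal_format_issues_list := by
  intro issues _
  unfold Spec_format_issues_list
  by_cases h : issues = []
  · simp [format_issues_list, format_issues_list_alt, h]
  · have hscan := fbl_scan_dedup issues
    have hne : PySem.List.dedup (issues.map fblClassify) ≠ [] := by
      match issues, h with
      | i :: t, _ =>
        intro hcon
        have : fblClassify i ∈ PySem.List.dedup ((i :: t).map fblClassify) := by
          rw [PySem.List.mem_dedup]; simp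
        rw [hcon] at this; exact absurd this (List.not_mem_nil)
    simp only [format_issues_list, format_issues_list_alt, if_neg h, fbl_map_eq]
    rcases hD : PySem.List.dedup (issues.map fblClassify) with _ | ⟨a, _ | ⟨b, _ | ⟨c, t⟩⟩⟩
    · exact absurd hD hne
    · rw [hD] at hscan
      simp only [hD] at *
      simp [hscan, PySem.List.pyGetD_zero_cons]
    · rw [hD] at hscan
      simp only [hD] at *
      have h1 : PySem.List.pyGetD [a, b] 1 "" = b := by
        simpa using PySem.List.pyGetD_natCast [a, b] 1 ""
      simp [hscan, PySem.List.pyGetD_zero_cons, h1]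
    · rw [hD] at hscan
      simp only [hD] at *
      have h1 : PySem.List.pyGetD (a :: b :: c :: t) 1 "" = b := by
        simpa using PySem.List.pyGetD_natCast (a :: b :: c :: t) 1 ""
      simp [hscan, PySem.List.pyGetD_zero_cons, h1]
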